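-- pv_equiv track=rewrite | github.com/antoinedoize/rainfall_occurrence_BMCD | article_code/util_files/statistics.py | split_spells_by_season_simple
-- ===== SOURCE A (Python) =====
-- def split_spells_by_season_simple(
--     data,
--     start_key="start_date_spell",
--     dur_key="duration_spell",
--     seasons=None,
-- ):
--     """
--     Group per-city spells by season.
--
--     Input  : data[city]["dry_spell"|"wet_spell"][start_key|dur_key] = list
--     Output : out[season][city]["dry_spell"|"wet_spell"][start_key|dur_key] = filtered list
--     """
--     if seasons is None:
--         seasons = {
--             "winter": {12, 1, 2},
--             "spring": {3, 4, 5},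
--             "summer": {6, 7, 8},
--             "autumn": {9, 10, 11},
--         }
--
--     out = {s: {} for s in seasons}
--     for city, city_data in data.items():
--         for season_name, months_set in seasons.items():
--             out[season_name][city] = {}
--             for spell_type in ("dry_spell", "wet_spell"):
--                 starts = city_data[spell_type][start_key]
--                 durs   = city_data[spell_type][dur_key]
--                 f_starts, f_durs = [], []
--                 for s, d in zip(starts, durs):
--                     month = int(str(s)[4:6])
--                     if month in months_set:
--                         f_starts.append(s)
--                         f_durs.append(d)
--                 out[season_name][city][spell_type] = {
--                     start_key: f_starts,
--                     dur_key:   f_durs,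
--                 }
--     return out
-- ===== SOURCE B (Python) =====
-- def split_spells_by_season_simple(
--     data,
--     start_key="start_date_spell",
--     dur_key="duration_spell",
--     seasons=None,
-- ):
--     """
--     Group per-city spells by season.
--
--     Different decomposition: invert `seasons` into a month -> [season names]
--     map, scatter every spell once (one month parse per spell instead of one
--     per season) into a flat accumulator keyed by (season, city, spell_type),
--     and assemble the nested output at the end.
--     """
--     if seasons is None:
--         seasons = {
--             "winter": {12, 1, 2},
--             "spring": {3, 4, 5},
--             "summer": {6, 7, 8},
--             "autumn": {9, 10, 11},
--         }
--
--     by_month = {}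
--     for name, months in seasons.items():
--         for m in months:
--             by_month.setdefault(m, []).append(name)
--
--     acc = {(name, city, st): ([], [])
--            for name in seasons
--            for city in data
--            for st in ("dry_spell", "wet_spell")}
--
--     for city, city_data in data.items():
--         for st in ("dry_spell", "wet_spell"):
--             for s, d in zip(city_data[st][start_key], city_data[st][dur_key]):
--                 for name in by_month.get(int(str(s)[4:6]), ()):
--                     pair = acc[(name, city, st)]
--                     pair[0].append(s)
--                     pair[1].append(d)
--
--     return {name: {city: {st: {start_key: acc[(name, city, st)][0],
--                                dur_key:   acc[(name, city, st)][1]}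
--                           for st in ("dry_spell", "wet_spell")}
--                    for city in data}
--             for name in seasons}
-- ===== Notes on version B (the rewrite author's own statement) =====
-- stated objective: faster
-- what changed: Instead of re-scanning and re-parsing every spell once per season (seasons x spells month parses) B inverts seasons into a month->season-names map, scatters each spell exactly once (one month parse per spell) into a flat accumulator keyed by (season, city, spell_type), and assembles the nested output at the end.
-- outside the precondition, e.g. on split_spells_by_season_simple({'': {}}, 'a', 'a', {}): A returns {}, B raises KeyError
import Mathlib
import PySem

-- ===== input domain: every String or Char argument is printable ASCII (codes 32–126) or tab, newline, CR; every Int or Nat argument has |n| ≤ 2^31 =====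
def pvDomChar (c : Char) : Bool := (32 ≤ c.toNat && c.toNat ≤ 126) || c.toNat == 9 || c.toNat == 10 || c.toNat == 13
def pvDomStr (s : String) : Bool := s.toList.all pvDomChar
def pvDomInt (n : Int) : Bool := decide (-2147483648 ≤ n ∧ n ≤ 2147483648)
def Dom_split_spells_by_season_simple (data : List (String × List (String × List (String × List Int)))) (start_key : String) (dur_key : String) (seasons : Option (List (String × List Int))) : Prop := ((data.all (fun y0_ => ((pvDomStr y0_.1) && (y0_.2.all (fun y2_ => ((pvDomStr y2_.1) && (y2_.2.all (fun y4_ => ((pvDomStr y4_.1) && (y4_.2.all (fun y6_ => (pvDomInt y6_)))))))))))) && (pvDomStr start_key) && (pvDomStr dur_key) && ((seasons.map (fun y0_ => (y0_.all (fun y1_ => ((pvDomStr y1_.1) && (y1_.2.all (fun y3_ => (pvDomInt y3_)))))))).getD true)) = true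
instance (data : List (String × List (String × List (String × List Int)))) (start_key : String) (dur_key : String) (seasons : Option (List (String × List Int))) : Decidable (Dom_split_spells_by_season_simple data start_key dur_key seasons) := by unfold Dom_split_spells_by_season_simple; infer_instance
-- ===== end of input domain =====

-- B inverts `seasons` into a month→season-names map and scatters every spell once
-- (one month parse per spell instead of one per season) into a flat accumulator keyed by
-- (season, city, spell_type), assembling the nested output at the end (objective: faster by a
-- constant factor — fewer month parses; a timing run could not measure it on its inputs).

-- helpers shared by both ports (the identical sub-expressions of the two Pythons)
-- month = int(str(s)[4:6]); the getD 0 is reached only outside Pre_ (Python raises ValueError there)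
def pvMonth (s : Int) : Int :=
  (PySem.Int.ofChars? (PySem.List.slice (PySem.Int.toChars s) (some 4) (some 6))).getD 0

def pvDefaultSeasons : List (String × List Int) :=
  [("winter", [12, 1, 2]), ("spring", [3, 4, 5]), ("summer", [6, 7, 8]), ("autumn", [9, 10, 11])]

def pvSts : List String := ["dry_spell", "wet_spell"]

-- ===== PORT A =====
def split_spells_by_season_simple (data : List (String × List (String × List (String × List Int)))) (start_key : String) (dur_key : String) (seasons : Option (List (String × List Int))) : List (String × List (String × List (String × List (String × List Int)))) :=
  let seasons' := seasons.getD pvDefaultSeasons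
  -- out = {s: {} for s in seasons}
  let out0 : PySem.Dict String (PySem.Dict String (PySem.Dict String (PySem.Dict String (List Int)))) :=
    seasons'.foldl (fun o p => o.insert p.1 PySem.Dict.empty) PySem.Dict.empty
  let out :=
    data.foldl (fun o cp =>
      seasons'.foldl (fun o sp =>
        -- out[season_name][city] = {}
        let o := o.insert sp.1 ((o.getD sp.1 PySem.Dict.empty).insert cp.1 PySem.Dict.empty)
        pvSts.foldl (fun o st =>
          -- KeyError in Python where the getD defaults fire: excluded by Pre_
          let spell := (PySem.Dict.mk cp.2).getD st []
          let starts := (PySem.Dict.mk spell).getD start_key []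
          let durs := (PySem.Dict.mk spell).getD dur_key []
          let fd := (starts.zip durs).foldl
            (fun fs sd => if sp.2.contains (pvMonth sd.1) then (fs.1 ++ [sd.1], fs.2 ++ [sd.2]) else fs)
            (([], []) : List Int × List Int)
          -- out[season_name][city][spell_type] = {start_key: f_starts, dur_key: f_durs}
          o.insert sp.1 ((o.getD sp.1 PySem.Dict.empty).insert cp.1
            (((o.getD sp.1 PySem.Dict.empty).getD cp.1 PySem.Dict.empty).insert st
              ((PySem.Dict.empty.insert start_key fd.1).insert dur_key fd.2)))) o) o) out0
  out.items.map (fun sp => (sp.1, sp.2.items.map (fun cp => (cp.1, cp.2.items.map (fun tp => (tp.1, tp.2.items))))))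

-- ===== PORT B =====
def split_spells_by_season_simple_alt (data : List (String × List (String × List (String × List Int)))) (start_key : String) (dur_key : String) (seasons : Option (List (String × List Int))) : List (String × List (String × List (String × List (String × List Int)))) :=
  let seasons' := seasons.getD pvDefaultSeasons
  -- by_month: month -> [season names]   (setdefault(m, []).append(name) = modify m [] (· ++ [name]))
  let byMonth : PySem.Dict Int (List String) :=
    seasons'.foldl (fun bm p => p.2.foldl (fun bm m => bm.modify m [] (· ++ [p.1])) bm) PySem.Dict.empty
  -- acc: skeleton with one ([], []) pair per (season, city, spell_type)
  let acc0 : PySem.Dict (String × String × String) (List Int × List Int) :=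
    seasons'.foldl (fun a p =>
      data.foldl (fun a cp =>
        pvSts.foldl (fun a st => a.insert (p.1, cp.1, st) ([], [])) a) a) PySem.Dict.empty
  -- scatter: each spell parsed once, appended to every season containing its month
  let acc :=
    data.foldl (fun a cp =>
      pvSts.foldl (fun a st =>
        let spell := (PySem.Dict.mk cp.2).getD st []
        let starts := (PySem.Dict.mk spell).getD start_key []
        let durs := (PySem.Dict.mk spell).getD dur_key []
        (starts.zip durs).foldl (fun a sd =>
          (byMonth.getD (pvMonth sd.1) []).foldl (fun a nm =>
            a.modify (nm, cp.1, st) ([], []) (fun pr => (pr.1 ++ [sd.1], pr.2 ++ [sd.2]))) a) a) a) acc0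
  -- assemble the nested output (comprehensions over dict keys, which are unique in Python)
  seasons'.map (fun p => (p.1, data.map (fun cp => (cp.1,
    pvSts.map (fun st =>
      (st, ((PySem.Dict.empty.insert start_key (acc.getD (p.1, cp.1, st) ([], [])).1).insert
              dur_key (acc.getD (p.1, cp.1, st) ([], [])).2).items))))))

-- ===== PRECONDITION & SPEC =====
-- Pre_ excludes the inputs where a city's data lacks a "dry_spell"/"wet_spell"/start_key/dur_key key
-- or a zipped start value's decimal string is shorter than 5 characters: there Python A raises
-- (KeyError / ValueError) — except when `seasons` is an empty dict, whose empty inner loop lets A skip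
-- the lookups and return an empty result where B's single scatter pass still raises KeyError; it also
-- excludes assoc-list inputs whose season-name, per-season month or city key lists have duplicates,
-- which cannot arise from Python dicts/sets at all.
def Pre_split_spells_by_season_simple (data : List (String × List (String × List (String × List Int)))) (start_key : String) (dur_key : String) (seasons : Option (List (String × List Int))) : Prop :=
  ((seasons.getD pvDefaultSeasons).map (·.1)).Nodup ∧
  (∀ p ∈ (seasons.getD pvDefaultSeasons), p.2.Nodup) ∧
  (data.map (·.1)).Nodup ∧
  ∀ cp ∈ data, ∀ st ∈ pvSts,
    (PySem.Dict.mk cp.2).contains st = true ∧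
    (PySem.Dict.mk ((PySem.Dict.mk cp.2).getD st [])).contains start_key = true ∧
    (PySem.Dict.mk ((PySem.Dict.mk cp.2).getD st [])).contains dur_key = true ∧
    ∀ pr ∈ ((PySem.Dict.mk ((PySem.Dict.mk cp.2).getD st [])).getD start_key []).zip
            ((PySem.Dict.mk ((PySem.Dict.mk cp.2).getD st [])).getD dur_key []),
      5 ≤ (PySem.Int.toChars pr.1).length
instance (data : List (String × List (String × List (String × List Int)))) (start_key : String) (dur_key : String) (seasons : Option (List (String × List Int))) : Decidable (Pre_split_spells_by_season_simple data start_key dur_key seasons) := by unfold Pre_split_spells_by_season_simple; infer_instance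

def pvWitness_split_spells_by_season_simple : (List (String × List (String × List (String × List Int)))) × String × String × (Option (List (String × List Int))) :=
  ([("paris", [("dry_spell", [("start", [19990115]), ("dur", [3])]),
               ("wet_spell", [("start", []), ("dur", [])])])],
   "start", "dur", none)

def Spec_split_spells_by_season_simple (data : List (String × List (String × List (String × List Int)))) (start_key : String) (dur_key : String) (seasons : Option (List (String × List Int))) (out : List (String × List (String × List (String × List (String × List Int))))) : Prop := out = split_spells_by_season_simple_alt data start_key dur_key seasons
instance (data : List (String × List (String × List (String × List Int)))) (start_key : String) (dur_key : String) (seasons : Option (List (String × List Int))) (out : List (String × List (String × List (String × List (String × List Int))))) : Decidable (Spec_split_spells_by_season_simple data start_key dur_key seasons out) := by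
  unfold Spec_split_spells_by_season_simple
  letI i1 : DecidableEq (List (String × List Int)) := inferInstance
  letI i2 : DecidableEq (List (String × List (String × List Int))) := inferInstance
  letI i3 : DecidableEq (List (String × List (String × List (String × List Int)))) := inferInstance
  letI i4 : DecidableEq (List (String × List (String × List (String × List (String × List Int))))) := inferInstance
  infer_instance

-- ===== CLAIM (what is proved, stated in full; the proofs are below) =====
def Claim_equal_split_spells_by_season_simple : Prop := ∀ (data : List (String × List (String × List (String × List Int)))) (start_key : String) (dur_key : String) (seasons : Option (List (String × List Int))), Dom_split_spells_by_season_simple data start_key dur_key seasons → Pre_split_spells_by_season_simple data start_key dur_key seasons → Spec_split_spells_by_season_simple data start_key dur_key seasons (split_spells_by_season_simple data start_key dur_key seasons)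

-- ===== LEMMAS AND PROOFS =====

-- the common canonical form both ports are reduced to
def pvPairs (cd : List (String × List (String × List Int))) (st sk dk : String) : List (Int × Int) :=
  ((PySem.Dict.mk ((PySem.Dict.mk cd).getD st [])).getD sk []).zip
    ((PySem.Dict.mk ((PySem.Dict.mk cd).getD st [])).getD dk [])

def pvFilt (ms : List Int) (prs : List (Int × Int)) : List Int × List Int :=
  ((prs.filter (fun sd => ms.contains (pvMonth sd.1))).map (·.1),
   (prs.filter (fun sd => ms.contains (pvMonth sd.1))).map (·.2))

def pvInner (sk dk : String) (fd : List Int × List Int) : PySem.Dict String (List Int) :=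
  (PySem.Dict.empty.insert sk fd.1).insert dk fd.2

def pvCityVal (sk dk : String) (ms : List Int) (cd : List (String × List (String × List Int))) :
    PySem.Dict String (PySem.Dict String (List Int)) :=
  (PySem.Dict.empty.insert "dry_spell" (pvInner sk dk (pvFilt ms (pvPairs cd "dry_spell" sk dk)))).insert
    "wet_spell" (pvInner sk dk (pvFilt ms (pvPairs cd "wet_spell" sk dk)))

def pvCanon (data : List (String × List (String × List (String × List Int)))) (sk dk : String)
    (seasons' : List (String × List Int)) : List (String × List (String × List (String × List (String × List Int)))) :=
  seasons'.map (fun p => (p.1, data.map (fun cp => (cp.1,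
    pvSts.map (fun st => (st, (pvInner sk dk (pvFilt p.2 (pvPairs cp.2 st sk dk))).items))))))

-- generic helper lemmas about Dict folds ------------------------------------

-- appending filtered pairs with an accumulator pair (A's inner f_starts/f_durs loop)
lemma pvFoldl_append_if_pair {α β : Type} (p : α × β → Bool) (l : List (α × β)) (a : List α) (b : List β) :
    l.foldl (fun fs sd => if p sd then (fs.1 ++ [sd.1], fs.2 ++ [sd.2]) else fs) (a, b)
      = (a ++ (l.filter p).map (·.1), b ++ (l.filter p).map (·.2)) := by
  induction l generalizing a b with
  | nil => simp
  | cons x xs ih =>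
    by_cases hx : p x = true
    · simp [List.foldl_cons, hx, ih]
    · simp only [Bool.not_eq_true] at hx
      simp [List.foldl_cons, hx, ih]

-- a fold of inserts at keys not equal to n leaves getD n unchanged
lemma pvGetD_foldl_insert_of_not_mem {κ ν β : Type} [BEq κ] [LawfulBEq κ] [DecidableEq κ]
    (l : List β) (key : β → κ) (f : PySem.Dict κ ν → β → ν) (d : PySem.Dict κ ν) (n : κ) (d0 : ν)
    (h : n ∉ l.map key) :
    (l.foldl (fun d x => d.insert (key x) (f d x)) d).getD n d0 = d.getD n d0 := by
  induction l generalizing d with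
  | nil => rfl
  | cons x xs ih =>
    simp only [List.map_cons, List.mem_cons, not_or] at h
    rw [List.foldl_cons, ih _ h.2, PySem.Dict.getD_insert, if_neg h.1]

-- a fold of inserts of one constant value preserves "every getD is that value"
lemma pvGetD_foldl_insert_const {κ ν β : Type} [BEq κ] [LawfulBEq κ] [DecidableEq κ]
    (c : ν) (key : β → κ) (l : List β) (d : PySem.Dict κ ν) (h : ∀ t, d.getD t c = c) (t : κ) :
    (l.foldl (fun d x => d.insert (key x) c) d).getD t c = c := by
  induction l generalizing d with
  | nil => exact h t
  | cons x xs ih =>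
    rw [List.foldl_cons]
    refine ih _ (fun t' => ?_)
    rw [PySem.Dict.getD_insert]
    split
    · rfl
    · exact h t'

-- PySem.Set facts needed for the keys of A's outer dict
lemma pvSet_update_of_subset {α : Type} [BEq α] [LawfulBEq α] (l : List α) (s : PySem.Set α)
    (h : ∀ x ∈ l, x ∈ s) : PySem.Set.update s l = s := by
  induction l generalizing s with
  | nil => rfl
  | cons x xs ih =>
    have hx : x ∈ s := h x (List.mem_cons_self)
    have : PySem.Set.add s x = s := by
      simp [PySem.Set.add, PySem.Set.contains, hx]
    simpa [PySem.Set.update, List.foldl_cons, this] using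
      ih s (fun y hy => h y (List.mem_cons_of_mem _ hy))

lemma pvFoldl_add_of_disjoint {α : Type} [BEq α] [LawfulBEq α] (l : List α) (s : PySem.Set α)
    (hnd : l.Nodup) (hdisj : ∀ x ∈ l, x ∉ s) : l.foldl PySem.Set.add s = s ++ l := by
  induction l generalizing s with
  | nil => simp
  | cons x xs ih =>
    simp only [List.nodup_cons] at hnd
    have hx : PySem.Set.add s x = s ++ [x] := by
      simp [PySem.Set.add, PySem.Set.contains, hdisj x List.mem_cons_self]
    rw [List.foldl_cons, hx, ih (s ++ [x]) hnd.2 (fun y hy => by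
      simp only [List.mem_append, List.mem_singleton, not_or]
      exact ⟨hdisj y (List.mem_cons_of_mem _ hy), fun he => hnd.1 (he ▸ hy)⟩)]
    simp

lemma pvSet_update_nil_of_nodup {α : Type} [BEq α] [LawfulBEq α] (l : List α) (h : l.Nodup) :
    PySem.Set.update [] l = l := by
  have : PySem.Set.update ([] : PySem.Set α) l = l.foldl PySem.Set.add [] := by
    simp [PySem.Set.update]
  rw [this, pvFoldl_add_of_disjoint l [] h (by simp)]
  simp

-- A-side: abbreviations for the dict layers
abbrev PvDI := PySem.Dict String (List Int)
abbrev PvDC := PySem.Dict String PvDI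
abbrev PvDS := PySem.Dict String PvDC
abbrev PvDO := PySem.Dict String PvDS

-- the body of A's per-season loop, verbatim
def pvAstep (sk dk : String) (cp : String × List (String × List (String × List Int)))
    (o : PvDO) (sp : String × List Int) : PvDO :=
  let o := o.insert sp.1 ((o.getD sp.1 PySem.Dict.empty).insert cp.1 PySem.Dict.empty)
  pvSts.foldl (fun o st =>
    let spell := (PySem.Dict.mk cp.2).getD st []
    let starts := (PySem.Dict.mk spell).getD sk []
    let durs := (PySem.Dict.mk spell).getD dk []
    let fd := (starts.zip durs).foldl
      (fun fs sd => if sp.2.contains (pvMonth sd.1) then (fs.1 ++ [sd.1], fs.2 ++ [sd.2]) else fs)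
      (([], []) : List Int × List Int)
    o.insert sp.1 ((o.getD sp.1 PySem.Dict.empty).insert cp.1
      (((o.getD sp.1 PySem.Dict.empty).getD cp.1 PySem.Dict.empty).insert st
        ((PySem.Dict.empty.insert sk fd.1).insert dk fd.2)))) o

-- A's season-loop body is one insert of the city value
lemma pvAstep_eq (sk dk : String) (cp : String × List (String × List (String × List Int)))
    (o : PvDO) (sp : String × List Int) :
    pvAstep sk dk cp o sp
      = o.insert sp.1 ((o.getD sp.1 PySem.Dict.empty).insert cp.1 (pvCityVal sk dk sp.2 cp.2)) := by
  simp only [pvAstep, pvSts, List.foldl_cons, List.foldl_nil, pvFoldl_append_if_pair,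
    PySem.Dict.getD_insert_self, PySem.Dict.insert_insert_self, List.nil_append]
  rfl

-- folding A's season loop: the value stored at a season name n present in seasons'
lemma pvSeason_fold_getD (sk dk : String) (cp : String × List (String × List (String × List Int)))
    (seasons' : List (String × List Int)) (hnd : (seasons'.map (·.1)).Nodup)
    (n : String) (ms : List Int) (hmem : (n, ms) ∈ seasons') (o : PvDO) :
    (seasons'.foldl (pvAstep sk dk cp) o).getD n PySem.Dict.empty
      = (o.getD n PySem.Dict.empty).insert cp.1 (pvCityVal sk dk ms cp.2) := by
  induction seasons' generalizing o with
  | nil => simp at hmem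
  | cons sp rest ih =>
    simp only [List.map_cons, List.nodup_cons] at hnd
    rw [List.foldl_cons]
    rcases List.mem_cons.1 hmem with h | h
    · -- the head is (n, ms); the rest do not touch key n
      obtain ⟨rfl, rfl⟩ : sp.1 = n ∧ sp.2 = ms := by
        cases h; exact ⟨rfl, rfl⟩
      have hrest : sp.1 ∉ rest.map (·.1) := hnd.1
      calc (rest.foldl (pvAstep sk dk cp) (pvAstep sk dk cp o sp)).getD sp.1 PySem.Dict.empty
          = (pvAstep sk dk cp o sp).getD sp.1 PySem.Dict.empty := by
            have := pvGetD_foldl_insert_of_not_mem rest (·.1)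
              (fun o sp' => (o.getD sp'.1 PySem.Dict.empty).insert cp.1 (pvCityVal sk dk sp'.2 cp.2))
              (pvAstep sk dk cp o sp) sp.1 PySem.Dict.empty hrest
            rw [← this]
            congr 1
            exact PySem.List.foldl_congr_mem rest _ _ _ (fun o' sp' _ => pvAstep_eq sk dk cp o' sp')
        _ = (o.getD sp.1 PySem.Dict.empty).insert cp.1 (pvCityVal sk dk sp.2 cp.2) := by
            rw [pvAstep_eq, PySem.Dict.getD_insert_self]
    · -- the head has a different name
      have hne : n ≠ sp.1 := by
        intro he; exact hnd.1 (he ▸ (List.mem_map.2 ⟨(n, ms), h, rfl⟩))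
      rw [ih hnd.2 h, pvAstep_eq, PySem.Dict.getD_insert, if_neg hne]

-- A's double loop restricted to one season key n: a plain fold of city inserts
lemma pvData_fold_getD (sk dk : String) (data : List (String × List (String × List (String × List Int))))
    (seasons' : List (String × List Int)) (hnd : (seasons'.map (·.1)).Nodup)
    (n : String) (ms : List Int) (hmem : (n, ms) ∈ seasons') (o : PvDO) :
    (data.foldl (fun o cp => seasons'.foldl (pvAstep sk dk cp) o) o).getD n PySem.Dict.empty
      = data.foldl (fun sd cp => sd.insert cp.1 (pvCityVal sk dk ms cp.2)) (o.getD n PySem.Dict.empty) := by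
  induction data generalizing o with
  | nil => rfl
  | cons cp rest ih =>
    rw [List.foldl_cons, List.foldl_cons, ih, pvSeason_fold_getD sk dk cp seasons' hnd n ms hmem]

-- keys of A's outer dict stay exactly the season names
lemma pvKeys_season_fold (sk dk : String) (cp : String × List (String × List (String × List Int)))
    (seasons' : List (String × List Int)) (o : PvDO) :
    (seasons'.foldl (pvAstep sk dk cp) o).keys = PySem.Set.update o.keys (seasons'.map (·.1)) := by
  rw [PySem.List.foldl_congr_mem seasons' _
    (fun o sp => o.insert sp.1 ((o.getD sp.1 PySem.Dict.empty).insert cp.1 (pvCityVal sk dk sp.2 cp.2))) o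
    (fun o' sp' _ => pvAstep_eq sk dk cp o' sp')]
  exact PySem.Dict.keys_foldl_insert_key seasons' (·.1) _ o

lemma pvKeys_data_fold (sk dk : String) (data : List (String × List (String × List (String × List Int))))
    (seasons' : List (String × List Int)) (o : PvDO)
    (h : ∀ x ∈ seasons'.map (·.1), x ∈ o.keys) :
    (data.foldl (fun o cp => seasons'.foldl (pvAstep sk dk cp) o) o).keys = o.keys := by
  induction data generalizing o with
  | nil => rfl
  | cons cp rest ih =>
    rw [List.foldl_cons, ih, pvKeys_season_fold, pvSet_update_of_subset _ _ h]
    rw [pvKeys_season_fold, pvSet_update_of_subset _ _ h]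
    exact h

-- the items of pvCityVal, spelled as the map over ("dry_spell", "wet_spell")
lemma pvCityVal_items (sk dk : String) (ms : List Int) (cd : List (String × List (String × List Int))) :
    (pvCityVal sk dk ms cd).items.map (fun tp => (tp.1, tp.2.items))
      = pvSts.map (fun st => (st, (pvInner sk dk (pvFilt ms (pvPairs cd st sk dk))).items)) := by
  have h1 : (PySem.Dict.empty.insert "dry_spell"
      (pvInner sk dk (pvFilt ms (pvPairs cd "dry_spell" sk dk)))).contains "wet_spell" = false := by
    rw [PySem.Dict.contains_insert]
    simp [PySem.Dict.contains_empty]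
  rw [pvCityVal, PySem.Dict.items_insert_of_not_contains _ _ h1,
    PySem.Dict.items_insert_of_not_contains _ _ (PySem.Dict.contains_empty _)]
  simp [PySem.Dict.empty, pvSts]

lemma pvA_eq_canon (data : List (String × List (String × List (String × List Int)))) (sk dk : String)
    (seasons : Option (List (String × List Int)))
    (hs : ((seasons.getD pvDefaultSeasons).map (·.1)).Nodup)
    (hc : (data.map (·.1)).Nodup) :
    split_spells_by_season_simple data sk dk seasons = pvCanon data sk dk (seasons.getD pvDefaultSeasons) := by
  unfold split_spells_by_season_simple
  set s' := seasons.getD pvDefaultSeasons with hs'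
  change ((data.foldl (fun o cp => s'.foldl (pvAstep sk dk cp) o)
      (s'.foldl (fun o p => o.insert p.1 PySem.Dict.empty) PySem.Dict.empty)).items.map
      (fun sp => (sp.1, sp.2.items.map (fun cp => (cp.1, cp.2.items.map (fun tp => (tp.1, tp.2.items))))))) = _
  set out0 : PvDO := s'.foldl (fun o p => o.insert p.1 PySem.Dict.empty) PySem.Dict.empty with hout0
  set F := data.foldl (fun o cp => s'.foldl (pvAstep sk dk cp) o) out0 with hF
  have hkeys0 : out0.keys = s'.map (·.1) := by
    rw [hout0, PySem.Dict.keys_foldl_insert_key s' (·.1) (fun _ _ => PySem.Dict.empty) PySem.Dict.empty,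
      PySem.Dict.keys_empty, pvSet_update_nil_of_nodup _ hs]
  have hFkeys : F.keys = s'.map (·.1) := by
    rw [hF, pvKeys_data_fold sk dk data s' out0 (fun x hx => by rw [hkeys0]; exact hx), hkeys0]
  have hFnodup : F.keys.Nodup := by rw [hFkeys]; exact hs
  rw [PySem.Dict.items_eq_map_keys F hFnodup PySem.Dict.empty, hFkeys]
  unfold pvCanon
  rw [List.map_map, List.map_map]
  apply List.map_congr_left
  intro p hp
  have hget : F.getD p.1 PySem.Dict.empty
      = data.foldl (fun sd cp => sd.insert cp.1 (pvCityVal sk dk p.2 cp.2)) PySem.Dict.empty := by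
    rw [hF, pvData_fold_getD sk dk data s' hs p.1 p.2 (by simpa using hp) out0]
    have h0 : out0.getD p.1 PySem.Dict.empty = PySem.Dict.empty := by
      rw [hout0]
      exact pvGetD_foldl_insert_const PySem.Dict.empty (·.1) s' PySem.Dict.empty
        (fun t => PySem.Dict.getD_empty _ _) p.1
    rw [h0]
  have hitems : (F.getD p.1 PySem.Dict.empty).items
      = data.map (fun cp => (cp.1, pvCityVal sk dk p.2 cp.2)) := by
    rw [hget, PySem.Dict.items_foldl_insert_fresh data (·.1) (fun cp => pvCityVal sk dk p.2 cp.2)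
      PySem.Dict.empty (fun a _ => PySem.Dict.contains_empty _) hc]
    simp [PySem.Dict.empty]
  simp only [Function.comp, hitems, List.map_map]
  refine congrArg (fun t => (p.1, t)) (List.map_congr_left (fun cp _ => ?_))
  simp only [Function.comp]
  exact congrArg (fun t => (cp.1, t)) (pvCityVal_items sk dk p.2 cp.2)

-- ===== B-side lemmas =====

-- splitting a list at the unique element carrying a given key
lemma pvMem_split_unique {α κ : Type} (l : List α) (key : α → κ) (x : α)
    (hx : x ∈ l) (hnd : (l.map key).Nodup) :
    ∃ l1 l2, l = l1 ++ x :: l2 ∧ ∀ y ∈ l1 ++ l2, key y ≠ key x := by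
  obtain ⟨l1, l2, rfl⟩ := List.append_of_mem hx
  refine ⟨l1, l2, rfl, fun y hy he => ?_⟩
  rw [List.map_append, List.map_cons] at hnd
  rcases List.mem_append.1 hy with h | h
  · exact (List.disjoint_of_nodup_append hnd) (List.mem_map_of_mem h)
      (he ▸ List.mem_cons_self)
  · exact (List.nodup_cons.1 (List.nodup_append.1 hnd).2.1).1 (he ▸ List.mem_map_of_mem h)

-- l.flatMap (fun x => if p x then [f x] else []) = map f of the filtered list
lemma pvFlatMap_if_singleton {α β : Type} (l : List α) (p : α → Bool) (f : α → β) :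
    l.flatMap (fun x => if p x then [f x] else []) = (l.filter p).map f := by
  induction l with
  | nil => rfl
  | cons x xs ih =>
    by_cases hx : p x = true
    · simp [List.flatMap_cons, hx, ih]
    · simp only [Bool.not_eq_true] at hx
      simp [List.flatMap_cons, hx, ih]

-- B's append-to-both-components modify loop, read back at one key
lemma pvGetD_foldl_modify_pair {κ : Type} [BEq κ] [LawfulBEq κ] [DecidableEq κ]
    (l : List (κ × (Int × Int))) (a : PySem.Dict κ (List Int × List Int)) (t : κ) :
    (l.foldl (fun a e => a.modify e.1 ([], []) (fun pr => (pr.1 ++ [e.2.1], pr.2 ++ [e.2.2]))) a).getD t ([], [])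
      = ((a.getD t ([], [])).1 ++ (l.filter (fun e => e.1 == t)).map (·.2.1),
         (a.getD t ([], [])).2 ++ (l.filter (fun e => e.1 == t)).map (·.2.2)) := by
  induction l generalizing a with
  | nil => simp
  | cons e es ih =>
    rw [List.foldl_cons, ih, PySem.Dict.getD_modify, List.filter_cons]
    by_cases he : t = e.1
    · simp [he]
    · have : (e.1 == t) = false := by simp; exact fun h => he h.symm
      simp [if_neg he, this]

-- B's seasons inversion, looked up at month m and filtered to one season name
def pvByMonth (s' : List (String × List Int)) : PySem.Dict Int (List String) :=
  s'.foldl (fun bm p => p.2.foldl (fun bm m => bm.modify m [] (· ++ [p.1])) bm) PySem.Dict.empty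

lemma pvByMonth_filter (s' : List (String × List Int)) (hs : (s'.map (·.1)).Nodup)
    (n : String) (ms : List Int) (hmem : (n, ms) ∈ s') (hnd : ms.Nodup) (m : Int) :
    ((pvByMonth s').getD m []).filter (· == n) = if ms.contains m then [n] else [] := by
  have hflat : pvByMonth s'
      = (s'.flatMap (fun p => p.2.map (fun m => (m, p.1)))).foldl
          (fun d q => d.modify q.1 [] (· ++ [q.2])) PySem.Dict.empty := by
    rw [List.foldl_flatMap]
    unfold pvByMonth
    exact (PySem.List.foldl_congr_mem s' _ _ _ (fun bm p _ => by rw [List.foldl_map])).symm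
  rw [hflat, PySem.Dict.getD_foldl_modify_append, PySem.Dict.getD_empty, List.nil_append,
    List.filter_map, List.filter_filter]
  obtain ⟨l1, l2, rfl, hkey⟩ := pvMem_split_unique s' (·.1) (n, ms) hmem hs
  rw [List.filter_flatMap, List.flatMap_append, List.flatMap_cons]
  have hnil : ∀ y : String × List Int, y.1 ≠ n →
      (y.2.map (fun m' => (m', y.1))).filter
        (fun a => ((fun x => x == n) ∘ (·.2)) a && (a.1 == m)) = [] := by
    intro y hy
    rw [List.filter_map]
    simp [Function.comp, hy]
  rw [List.flatMap_eq_nil_iff.2 (fun y hy => hnil y (hkey y (List.mem_append_left _ hy))),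
    List.flatMap_eq_nil_iff.2 (fun y hy => hnil y (hkey y (List.mem_append_right _ hy))),
    List.nil_append, List.append_nil, List.filter_map]
  rw [show (fun a : Int × String => ((fun x => x == n) ∘ (·.2)) a && (a.1 == m))
        ∘ (fun m' : Int => (m', (n, ms).1)) = (fun m' : Int => m' == m) from by
      funext m'; simp [Function.comp]]
  rw [List.map_map, List.filter_beq]
  by_cases hm : m ∈ ms
  · rw [List.count_eq_one_of_mem hnd hm]
    simp [hm]
  · rw [List.count_eq_zero.2 hm]
    simp [hm]

-- B's accumulator skeleton and fill loop, named
def pvAcc0 (data : List (String × List (String × List (String × List Int))))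
    (s' : List (String × List Int)) : PySem.Dict (String × String × String) (List Int × List Int) :=
  s'.foldl (fun a p =>
    data.foldl (fun a cp =>
      pvSts.foldl (fun a st => a.insert (p.1, cp.1, st) ([], [])) a) a) PySem.Dict.empty

def pvFill (sk dk : String) (data : List (String × List (String × List (String × List Int))))
    (s' : List (String × List Int)) : PySem.Dict (String × String × String) (List Int × List Int) :=
  data.foldl (fun a cp =>
    pvSts.foldl (fun a st =>
      let spell := (PySem.Dict.mk cp.2).getD st []
      let starts := (PySem.Dict.mk spell).getD sk []
      let durs := (PySem.Dict.mk spell).getD dk []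
      (starts.zip durs).foldl (fun a sd =>
        ((pvByMonth s').getD (pvMonth sd.1) []).foldl (fun a nm =>
          a.modify (nm, cp.1, st) ([], []) (fun pr => (pr.1 ++ [sd.1], pr.2 ++ [sd.2]))) a) a) a)
    (pvAcc0 data s')

-- the fill loop flattened into one event list
def pvEv (sk dk : String) (data : List (String × List (String × List (String × List Int))))
    (s' : List (String × List Int)) : List ((String × String × String) × (Int × Int)) :=
  data.flatMap (fun cp =>
    pvSts.flatMap (fun st =>
      (pvPairs cp.2 st sk dk).flatMap (fun sd =>
        ((pvByMonth s').getD (pvMonth sd.1) []).map (fun nm => ((nm, cp.1, st), sd)))))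

lemma pvFill_eq_ev (sk dk : String) (data : List (String × List (String × List (String × List Int))))
    (s' : List (String × List Int)) :
    pvFill sk dk data s'
      = (pvEv sk dk data s').foldl
          (fun a e => a.modify e.1 ([], []) (fun pr => (pr.1 ++ [e.2.1], pr.2 ++ [e.2.2])))
          (pvAcc0 data s') := by
  unfold pvEv pvFill
  rw [List.foldl_flatMap]
  refine (PySem.List.foldl_congr_mem data _ _ _ (fun a cp _ => ?_))
  rw [List.foldl_flatMap]
  refine (PySem.List.foldl_congr_mem pvSts _ _ _ (fun a' st _ => ?_))
  rw [List.foldl_flatMap]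
  refine (PySem.List.foldl_congr_mem _ _ _ _ (fun a'' sd _ => ?_))
  rw [List.foldl_map]

lemma pvAcc0_getD (data : List (String × List (String × List (String × List Int))))
    (s' : List (String × List Int)) (t : String × String × String) :
    (pvAcc0 data s').getD t ([], []) = ([], []) := by
  have h : (s'.flatMap (fun p => data.flatMap (fun cp => pvSts.map (fun st => (p.1, cp.1, st))))).foldl
      (fun a t' => a.insert t' ([], [])) PySem.Dict.empty = pvAcc0 data s' := by
    unfold pvAcc0
    rw [List.foldl_flatMap]
    refine (PySem.List.foldl_congr_mem s' _ _ _ (fun a p _ => ?_))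
    rw [List.foldl_flatMap]
    refine (PySem.List.foldl_congr_mem data _ _ _ (fun a' cp _ => ?_))
    rw [List.foldl_map]
  rw [← h]
  exact pvGetD_foldl_insert_const ([], []) id _ PySem.Dict.empty
    (fun t' => PySem.Dict.getD_empty _ _) t

-- filtering the event list down to one (season, city, spell_type) target
lemma pvEv_filter (sk dk : String) (data : List (String × List (String × List (String × List Int))))
    (s' : List (String × List Int)) (hs : (s'.map (·.1)).Nodup) (hm : ∀ p ∈ s', p.2.Nodup)
    (hc : (data.map (·.1)).Nodup)
    (p : String × List Int) (hp : p ∈ s')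
    (cp : String × List (String × List (String × List Int))) (hcp : cp ∈ data)
    (st : String) (hst : st ∈ pvSts) :
    (pvEv sk dk data s').filter (fun e => e.1 == (p.1, cp.1, st))
      = ((pvPairs cp.2 st sk dk).filter (fun sd => p.2.contains (pvMonth sd.1))).map
          (fun sd => ((p.1, cp.1, st), sd)) := by
  rw [pvEv, List.filter_flatMap]
  -- cities other than cp contribute nothing
  have hcity : ∀ y : String × List (String × List (String × List Int)), y.1 ≠ cp.1 →
      (pvSts.flatMap (fun st' =>
        (pvPairs y.2 st' sk dk).flatMap (fun sd =>
          ((pvByMonth s').getD (pvMonth sd.1) []).map (fun nm => ((nm, y.1, st'), sd))))).filter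
        (fun e => e.1 == (p.1, cp.1, st)) = [] := by
    intro y hy
    rw [List.filter_eq_nil_iff]
    intro e he
    simp only [List.mem_flatMap, List.mem_map] at he
    obtain ⟨st', _, sd, _, nm, _, rfl⟩ := he
    simp [beq_iff_eq, Prod.ext_iff, hy]
  obtain ⟨l1, l2, hdata, hkey⟩ := pvMem_split_unique data (·.1) cp hcp hc
  subst hdata
  rw [List.flatMap_append, List.flatMap_cons,
    List.flatMap_eq_nil_iff.2 (fun y hy => hcity y (hkey y (List.mem_append_left _ hy))),
    List.flatMap_eq_nil_iff.2 (fun y hy => hcity y (hkey y (List.mem_append_right _ hy))),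
    List.nil_append, List.append_nil]
  -- spell types other than st contribute nothing
  have hstnil : ∀ st', st' ≠ st →
      ((pvPairs cp.2 st' sk dk).flatMap (fun sd =>
        ((pvByMonth s').getD (pvMonth sd.1) []).map (fun nm => ((nm, cp.1, st'), sd)))).filter
        (fun e => e.1 == (p.1, cp.1, st)) = [] := by
    intro st' hne
    rw [List.filter_eq_nil_iff]
    intro e he
    simp only [List.mem_flatMap, List.mem_map] at he
    obtain ⟨sd, _, nm, _, rfl⟩ := he
    simp [beq_iff_eq, Prod.ext_iff, hne]
  -- the matching (city, spell_type) block reduces to the month filter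
  have hinner : ((pvPairs cp.2 st sk dk).flatMap (fun sd =>
      ((pvByMonth s').getD (pvMonth sd.1) []).map (fun nm => ((nm, cp.1, st), sd)))).filter
        (fun e => e.1 == (p.1, cp.1, st))
      = ((pvPairs cp.2 st sk dk).filter (fun sd => p.2.contains (pvMonth sd.1))).map
          (fun sd => ((p.1, cp.1, st), sd)) := by
    rw [List.filter_flatMap]
    have per_sd : ∀ sd : Int × Int,
        (((pvByMonth s').getD (pvMonth sd.1) []).map (fun nm => ((nm, cp.1, st), sd))).filter
          (fun e => e.1 == (p.1, cp.1, st))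
        = if p.2.contains (pvMonth sd.1) then [((p.1, cp.1, st), sd)] else [] := by
      intro sd
      rw [List.filter_map]
      rw [show (fun e : (String × String × String) × (Int × Int) => e.1 == (p.1, cp.1, st))
            ∘ (fun nm => ((nm, cp.1, st), sd)) = (fun nm : String => nm == p.1) from by
          funext nm; by_cases h : nm = p.1 <;> simp [Function.comp, h]]
      rw [pvByMonth_filter s' hs p.1 p.2 (by simpa using hp) (hm p hp) (pvMonth sd.1)]
      split <;> simp
    simp only [per_sd]
    rw [pvFlatMap_if_singleton]
  rcases (by simpa [pvSts] using hst : st = "dry_spell" ∨ st = "wet_spell") with rfl | rfl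
  · show (List.flatMap _ pvSts).filter _ = _
    rw [show pvSts = ["dry_spell", "wet_spell"] from rfl]
    rw [List.flatMap_cons, List.flatMap_cons, List.flatMap_nil, List.append_nil,
      List.filter_append, hinner, hstnil "wet_spell" (by decide), List.append_nil]
  · show (List.flatMap _ pvSts).filter _ = _
    rw [show pvSts = ["dry_spell", "wet_spell"] from rfl]
    rw [List.flatMap_cons, List.flatMap_cons, List.flatMap_nil, List.append_nil,
      List.filter_append, hinner, hstnil "dry_spell" (by decide), List.nil_append]

lemma pvFill_getD (sk dk : String) (data : List (String × List (String × List (String × List Int))))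
    (s' : List (String × List Int)) (hs : (s'.map (·.1)).Nodup) (hm : ∀ p ∈ s', p.2.Nodup)
    (hc : (data.map (·.1)).Nodup)
    (p : String × List Int) (hp : p ∈ s')
    (cp : String × List (String × List (String × List Int))) (hcp : cp ∈ data)
    (st : String) (hst : st ∈ pvSts) :
    (pvFill sk dk data s').getD (p.1, cp.1, st) ([], []) = pvFilt p.2 (pvPairs cp.2 st sk dk) := by
  rw [pvFill_eq_ev, pvGetD_foldl_modify_pair, pvAcc0_getD,
    pvEv_filter sk dk data s' hs hm hc p hp cp hcp st hst]
  simp [pvFilt, List.map_map, Function.comp]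

lemma pvB_eq_canon (data : List (String × List (String × List (String × List Int)))) (sk dk : String)
    (seasons : Option (List (String × List Int)))
    (hs : ((seasons.getD pvDefaultSeasons).map (·.1)).Nodup)
    (hm : ∀ p ∈ (seasons.getD pvDefaultSeasons), p.2.Nodup)
    (hc : (data.map (·.1)).Nodup) :
    split_spells_by_season_simple_alt data sk dk seasons = pvCanon data sk dk (seasons.getD pvDefaultSeasons) := by
  unfold split_spells_by_season_simple_alt
  set s' := seasons.getD pvDefaultSeasons with hs'
  change (s'.map (fun p => (p.1, data.map (fun cp => (cp.1,
      pvSts.map (fun st =>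
        (st, ((PySem.Dict.empty.insert sk ((pvFill sk dk data s').getD (p.1, cp.1, st) ([], [])).1).insert
                dk ((pvFill sk dk data s').getD (p.1, cp.1, st) ([], [])).2).items))))))) = _
  unfold pvCanon
  refine List.map_congr_left (fun p hp => ?_)
  refine congrArg (fun t => (p.1, t)) (List.map_congr_left (fun cp hcp => ?_))
  refine congrArg (fun t => (cp.1, t)) (List.map_congr_left (fun st hst => ?_))
  rw [pvFill_getD sk dk data s' hs hm hc p hp cp hcp st hst]
  rfl

-- ===== VERDICT (by name: the statement is the Claim_ definition above) =====
theorem split_spells_by_season_simple_spec : Claim_equal_split_spells_by_season_simple := by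
  intro data sk dk seasons _hdom hpre
  obtain ⟨hs, hm, hc, _⟩ := hpre
  unfold Spec_split_spells_by_season_simple
  rw [pvA_eq_canon data sk dk seasons hs hc, pvB_eq_canon data sk dk seasons hs hm hc]
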